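-- pv_equiv track=rewrite | github.com/wu-jarry/CS2120 | pythonProject/Assignments/covid_diagnosed.py | count_by_location
-- ===== SOURCE A (Python) =====
-- def count_by_location(doses_tuples):
--     '''
--     This function determines the number of cases from each area the MLHU is responsible for
--     :param doses_tuples: The dictionary containing lists of tuples representing cases
--     :return: A tuple containing the counts for each of the three locations
--     '''
--     location_list = ["City of London", "Middlesex County", ""]
--     london_counter = 0
--     middlesex_counter = 0
--     unknown_counter = 0
--     for key, value in doses_tuples.items():
--         for element in value:  # For every value in the dictionary, increase the counter if it is associated with the respective locations
--             if element[2] == location_list[0]: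
--                 london_counter += 1
--             elif element[2] == location_list[1]:
--                 middlesex_counter += 1
--             elif element[2] == location_list[2]:
--                 unknown_counter += 1
--     return london_counter, middlesex_counter, unknown_counter
-- ===== SOURCE B (Python) =====
-- def count_by_location(doses_tuples):
--     locs = [element[2] for value in doses_tuples.values() for element in value]
--     return locs.count("City of London"), locs.count("Middlesex County"), locs.count("")
-- ===== Notes on version B (the rewrite author's own statement) =====
-- stated objective: idiomatic
-- what changed: Replaces the nested loop with three mutable counters and an if/elif chain by flattening all location labels into one list comprehension and reading off list.count for the three wanted labels.
import Mathlib
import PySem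

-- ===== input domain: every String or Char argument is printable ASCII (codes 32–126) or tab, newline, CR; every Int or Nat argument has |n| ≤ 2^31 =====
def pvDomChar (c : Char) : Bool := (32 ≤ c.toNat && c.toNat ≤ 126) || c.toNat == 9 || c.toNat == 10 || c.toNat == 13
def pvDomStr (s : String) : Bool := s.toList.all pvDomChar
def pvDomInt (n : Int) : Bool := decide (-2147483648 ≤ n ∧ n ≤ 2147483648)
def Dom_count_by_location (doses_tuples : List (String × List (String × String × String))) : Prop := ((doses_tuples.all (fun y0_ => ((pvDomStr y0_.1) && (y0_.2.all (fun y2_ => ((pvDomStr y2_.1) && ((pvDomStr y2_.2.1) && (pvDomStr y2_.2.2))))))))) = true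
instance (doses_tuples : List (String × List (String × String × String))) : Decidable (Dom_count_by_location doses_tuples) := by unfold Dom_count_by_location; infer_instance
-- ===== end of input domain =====

-- B replaces A's three mutable counters and if/elif chain by flattening the labels and reading list.count three times (idiomatic; same cost).

-- ===== PORT A =====
-- literal transliteration: the nested for-loops become folds over the same (london, middlesex, unknown) state
def count_by_location (doses_tuples : List (String × List (String × String × String))) : Int × Int × Int :=
  let location_list : List String := ["City of London", "Middlesex County", ""]
  let s := doses_tuples.foldl (fun s kv =>
    kv.2.foldl (fun s element =>
      if element.2.2 = location_list[0]! then (s.1 + 1, s.2.1, s.2.2)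
      else if element.2.2 = location_list[1]! then (s.1, s.2.1 + 1, s.2.2)
      else if element.2.2 = location_list[2]! then (s.1, s.2.1, s.2.2 + 1)
      else s) s) ((0 : Int), (0 : Int), (0 : Int))
  s

-- ===== PORT B =====
def count_by_location_alt (doses_tuples : List (String × List (String × String × String))) : Int × Int × Int :=
  let locs := doses_tuples.flatMap (fun kv => kv.2.map (fun element => element.2.2))
  ((PySem.List.count locs "City of London" : Int),
   (PySem.List.count locs "Middlesex County" : Int),
   (PySem.List.count locs "" : Int))

-- ===== PRECONDITION & SPEC =====
def Spec_count_by_location (doses_tuples : List (String × List (String × String × String))) (out : Int × Int × Int) : Prop := out = count_by_location_alt doses_tuples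
instance (doses_tuples : List (String × List (String × String × String))) (out : Int × Int × Int) : Decidable (Spec_count_by_location doses_tuples out) := by unfold Spec_count_by_location; infer_instance

-- ===== CLAIM (what is proved, stated in full; the proofs are below) =====
def Claim_equal_count_by_location : Prop := ∀ (doses_tuples : List (String × List (String × String × String))), Dom_count_by_location doses_tuples → Spec_count_by_location doses_tuples (count_by_location doses_tuples)

-- ===== LEMMAS AND PROOFS =====

-- A's inner loop adds, to each counter, the number of matching labels in the value list
theorem inner_foldl_eq (v : List (String × String × String)) (s : Int × Int × Int) :
    v.foldl (fun s element =>
      if element.2.2 = "City of London" then (s.1 + 1, s.2.1, s.2.2)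
      else if element.2.2 = "Middlesex County" then (s.1, s.2.1 + 1, s.2.2)
      else if element.2.2 = "" then (s.1, s.2.1, s.2.2 + 1)
      else s) s
    = (s.1 + ((v.map (fun e => e.2.2)).count "City of London" : Int),
       s.2.1 + ((v.map (fun e => e.2.2)).count "Middlesex County" : Int),
       s.2.2 + ((v.map (fun e => e.2.2)).count "" : Int)) := by
  induction v generalizing s with
  | nil => simp
  | cons e t ih =>
    simp only [List.foldl_cons, List.map_cons, ih]
    split_ifs with h1 h2 h3 <;>
      simp_all <;> omega

-- A's outer loop therefore counts over the flattened label list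
theorem outer_foldl_eq (dt : List (String × List (String × String × String))) (s : Int × Int × Int) :
    dt.foldl (fun s kv =>
      kv.2.foldl (fun s element =>
        if element.2.2 = "City of London" then (s.1 + 1, s.2.1, s.2.2)
        else if element.2.2 = "Middlesex County" then (s.1, s.2.1 + 1, s.2.2)
        else if element.2.2 = "" then (s.1, s.2.1, s.2.2 + 1)
        else s) s) s
    = (s.1 + ((dt.flatMap (fun kv => kv.2.map (fun e => e.2.2))).count "City of London" : Int),
       s.2.1 + ((dt.flatMap (fun kv => kv.2.map (fun e => e.2.2))).count "Middlesex County" : Int),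
       s.2.2 + ((dt.flatMap (fun kv => kv.2.map (fun e => e.2.2))).count "" : Int)) := by
  induction dt generalizing s with
  | nil => simp
  | cons kv t ih =>
    rw [List.foldl_cons, ih, inner_foldl_eq]
    simp only [List.flatMap_cons, List.count_append]
    push_cast
    ring_nf

-- ===== VERDICT (by name: the statement is the Claim_ definition above) =====
theorem count_by_location_spec : Claim_equal_count_by_location := by
  intro dt _
  show count_by_location dt = count_by_location_alt dt
  simp only [count_by_location, count_by_location_alt, PySem.List.count_eq,
    show (["City of London", "Middlesex County", ""] : List String)[0]! = "City of London" from rfl,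
    show (["City of London", "Middlesex County", ""] : List String)[1]! = "Middlesex County" from rfl,
    show (["City of London", "Middlesex County", ""] : List String)[2]! = "" from rfl]
  rw [outer_foldl_eq]
  simp
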